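-- pv_equiv track=rewrite | github.com/Joshjayboy/Competitive_Programming | python track/Allison's Game/allison.py | largest_square_in_histogram
-- ===== SOURCE A (Python) =====
-- def largest_square_in_histogram(N, heights):
--     stack = []
--     max_area = 0
--     i = 0
--
--     while i < N:
--         if not stack or heights[i] >= heights[stack[-1]]:
--             stack.append(i)
--             i += 1
--         else:
--             top_index = stack.pop()
--             if stack:
--                 width = i - stack[-1] - 1
--             else:
--                 width = i
--             max_area = max(max_area, min(heights[top_index], width) ** 2)
--
--     while stack:
--         top_index = stack.pop()
--         if stack:
--             width = i - stack[-1] - 1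
--         else:
--             width = i
--         max_area = max(max_area, min(heights[top_index], width) ** 2)
--
--     return max_area
-- ===== SOURCE B (Python) =====
-- def largest_square_in_histogram(N, heights):
--     max_area = 0
--     for i in range(N):
--         h = heights[i]
--         l = i - 1
--         while l >= 0 and heights[l] >= h:
--             l -= 1
--         r = i + 1
--         while r < N and heights[r] >= h:
--             r += 1
--         max_area = max(max_area, min(h, r - l - 1) ** 2)
--     return max_area
-- ===== Notes on version B (the rewrite author's own statement) =====
-- stated objective: simpler
-- what changed: A's interleaved monotonic-stack push/pop loop plus drain is replaced by a direct per-bar computation: for each bar, two plain scans find the nearest strictly shorter bar on each side, and one max over min(height, width)^2 gives the answer.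
import Mathlib
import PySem

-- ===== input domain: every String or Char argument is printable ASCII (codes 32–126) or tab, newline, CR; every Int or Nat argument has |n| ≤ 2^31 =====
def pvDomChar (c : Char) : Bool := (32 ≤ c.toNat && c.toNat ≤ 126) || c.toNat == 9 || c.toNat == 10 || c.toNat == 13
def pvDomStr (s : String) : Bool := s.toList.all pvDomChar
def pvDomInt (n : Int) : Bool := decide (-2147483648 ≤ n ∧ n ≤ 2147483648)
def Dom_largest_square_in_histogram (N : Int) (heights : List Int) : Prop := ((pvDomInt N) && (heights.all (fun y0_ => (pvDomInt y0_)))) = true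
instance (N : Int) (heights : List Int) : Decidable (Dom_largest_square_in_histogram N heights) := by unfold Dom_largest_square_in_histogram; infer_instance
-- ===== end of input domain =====

-- B replaces A's interleaved monotonic-stack loop by a per-bar nearest-shorter-bar scan (simpler, not faster).


-- ===== PORT A =====
-- heights[i]: Pre_ guarantees 0 ≤ i < heights.length at every access, so pyGet? is always some (shared accessor)
def pvH (hs : List Int) (i : Int) : Int := (PySem.List.pyGet? hs i).getD 0

-- A's second while loop (drain): pops the whole stack at the final i
def aDrain (hs : List Int) (i : Int) (stack : List Int) (ma : Int) : Int :=
  match stack with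
  | [] => ma
  | t :: rest =>
    let width : Int := match rest with | [] => i | p :: _ => i - p - 1
    aDrain hs i rest (max ma ((min (pvH hs t) width) ^ 2))

-- A's first while loop (stack held top-first)
def aMain (N : Int) (hs : List Int) (stack : List Int) (ma : Int) (i : Int) : Int :=
  if _h : i < N then
    match stack with
    | [] => aMain N hs [i] ma (i + 1)
    | t :: rest =>
      if pvH hs i ≥ pvH hs t then
        aMain N hs (i :: t :: rest) ma (i + 1)
      else
        let width : Int := match rest with | [] => i | p :: _ => i - p - 1
        aMain N hs rest (max ma ((min (pvH hs t) width) ^ 2)) i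
  else aDrain hs i stack ma
termination_by ((N - i).toNat * 2 + stack.length)
decreasing_by all_goals (simp only [List.length_cons, List.length_nil]; omega)

def largest_square_in_histogram (N : Int) (heights : List Int) : Int :=
  aMain N heights [] 0 0

-- ===== PORT B =====
-- inner `while l >= 0 and heights[l] >= h: l -= 1`
def bLeft (hs : List Int) (hg : Int) (l : Int) : Int :=
  if _h : 0 ≤ l ∧ pvH hs l ≥ hg then bLeft hs hg (l - 1) else l
termination_by (l + 1).toNat
decreasing_by omega

-- inner `while r < N and heights[r] >= h: r += 1`
def bRight (N : Int) (hs : List Int) (hg : Int) (r : Int) : Int :=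
  if _h : r < N ∧ pvH hs r ≥ hg then bRight N hs hg (r + 1) else r
termination_by (N - r).toNat
decreasing_by omega

-- `for i in range(N)`
def bMain (N : Int) (hs : List Int) (ma : Int) (i : Int) : Int :=
  if _h : i < N then
    let hg := pvH hs i
    let l := bLeft hs hg (i - 1)
    let r := bRight N hs hg (i + 1)
    bMain N hs (max ma ((min hg (r - l - 1)) ^ 2)) (i + 1)
  else ma
termination_by (N - i).toNat
decreasing_by omega

def largest_square_in_histogram_alt (N : Int) (heights : List Int) : Int :=
  bMain N heights 0 0

-- ===== PRECONDITION & SPEC =====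
-- Python A raises IndexError exactly when N > len(heights) (the loop reaches i = len(heights)); nothing else is excluded.
def Pre_largest_square_in_histogram (N : Int) (heights : List Int) : Prop :=
  N ≤ (heights.length : Int)
instance (N : Int) (heights : List Int) : Decidable (Pre_largest_square_in_histogram N heights) := by
  unfold Pre_largest_square_in_histogram; infer_instance

def pvWitness_largest_square_in_histogram : Int × List Int := (5, [2, 1, 4, 4, 2])

def Spec_largest_square_in_histogram (N : Int) (heights : List Int) (out : Int) : Prop := out = largest_square_in_histogram_alt N heights
instance (N : Int) (heights : List Int) (out : Int) : Decidable (Spec_largest_square_in_histogram N heights out) := by unfold Spec_largest_square_in_histogram; infer_instance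

-- ===== CLAIM (what is proved, stated in full; the proofs are below) =====
def Claim_equal_largest_square_in_histogram : Prop := ∀ (N : Int) (heights : List Int), Dom_largest_square_in_histogram N heights → Pre_largest_square_in_histogram N heights → Spec_largest_square_in_histogram N heights (largest_square_in_histogram N heights)

-- ===== LEMMAS AND PROOFS =====

-- width of the popped bar in terms of the stack below it (-1 encodes "empty below")
def below (rest : List Int) : Int := match rest with | [] => -1 | p :: _ => p

-- B's per-bar value: min(height, nearest-shorter window width)^2
def gval (N : Int) (hs : List Int) (i : Int) : Int :=
  (min (pvH hs i) (bRight N hs (pvH hs i) (i + 1) - bLeft hs (pvH hs i) (i - 1) - 1)) ^ 2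

-- m is the leftmost bar of its plateau: everything strictly between its left boundary and m is strictly taller
def CanL (hs : List Int) (m : Int) : Prop :=
  ∀ j, bLeft hs (pvH hs m) (m - 1) < j → j < m → pvH hs j > pvH hs m

lemma sq_min_mono (a w W : Int) (h1 : 1 ≤ w) (h2 : w ≤ W) : (min a w) ^ 2 ≤ (min a W) ^ 2 := by
  rcases le_or_gt a w with h | h
  · rw [min_eq_left h, min_eq_left (h.trans h2)]
  · have hw : min a w = w := min_eq_right h.le
    have hmin : w ≤ min a W := le_min h.le h2
    rw [hw]
    have h0 : (0:Int) ≤ w := by omega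
    nlinarith [hmin, h0]

lemma bLeft_spec (hs : List Int) (hg l : Int) (hl : -1 ≤ l) :
    -1 ≤ bLeft hs hg l ∧ bLeft hs hg l ≤ l ∧ (0 ≤ bLeft hs hg l → pvH hs (bLeft hs hg l) < hg) ∧
    ∀ j, bLeft hs hg l < j → j ≤ l → pvH hs j ≥ hg := by
  fun_induction bLeft hs hg l with
  | case1 l hc ih =>
    obtain ⟨h1, h2, h3, h4⟩ := ih (by omega)
    refine ⟨h1, by omega, h3, fun j hj1 hj2 => ?_⟩
    rcases lt_or_ge j l with h | h
    · exact h4 j hj1 (by omega)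
    · have : j = l := by omega
      subst this; exact hc.2
  | case2 l hc =>
    refine ⟨hl, le_refl _, fun h0 => ?_, fun j hj1 hj2 => by omega⟩
    by_contra hge
    exact hc ⟨h0, by omega⟩

lemma bLeft_eq_of (hs : List Int) (hg l x : Int) (h1 : -1 ≤ x) (h2 : x ≤ l)
    (h3 : 0 ≤ x → pvH hs x < hg) (h4 : ∀ j, x < j → j ≤ l → pvH hs j ≥ hg) :
    bLeft hs hg l = x := by
  fun_induction bLeft hs hg l with
  | case1 l hc ih =>
    have hxl : x ≠ l := by
      intro he; subst he
      exact absurd (h3 hc.1) (by omega)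
    exact ih (by omega) (fun j hj1 hj2 => h4 j hj1 (by omega))
  | case2 l hc =>
    by_contra hne
    have hxl : x < l := by omega
    have := h4 l (by omega) (le_refl _)
    have hl0 : 0 ≤ l := by omega
    exact hc ⟨hl0, this⟩

lemma bRight_spec (N : Int) (hs : List Int) (hg r : Int) (hr : r ≤ N) :
    r ≤ bRight N hs hg r ∧ bRight N hs hg r ≤ N ∧
    (bRight N hs hg r < N → pvH hs (bRight N hs hg r) < hg) ∧
    ∀ j, r ≤ j → j < bRight N hs hg r → pvH hs j ≥ hg := by
  fun_induction bRight N hs hg r with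
  | case1 r hc ih =>
    obtain ⟨h1, h2, h3, h4⟩ := ih (by omega)
    refine ⟨by omega, h2, h3, fun j hj1 hj2 => ?_⟩
    rcases lt_or_ge r j with h | h
    · exact h4 j (by omega) hj2
    · have : j = r := by omega
      subst this; exact hc.2
  | case2 r hc =>
    refine ⟨le_refl _, ?_, fun h0 => ?_, fun j hj1 hj2 => by omega⟩
    · omega
    · by_contra hge
      exact hc ⟨h0, by omega⟩

lemma bRight_eq_of (N : Int) (hs : List Int) (hg r x : Int) (h1 : r ≤ x) (h2 : x ≤ N)
    (h3 : x < N → pvH hs x < hg) (h4 : ∀ j, r ≤ j → j < x → pvH hs j ≥ hg) :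
    bRight N hs hg r = x := by
  fun_induction bRight N hs hg r with
  | case1 r hc ih =>
    have hxr : x ≠ r := by
      intro he; subst he
      exact absurd (h3 hc.1) (by omega)
    exact ih (by omega) (fun j hj1 hj2 => h4 j (by omega) hj2)
  | case2 r hc =>
    by_contra hne
    have hxr : r < x := by omega
    have := h4 r (le_refl _) (by omega)
    have hrN : r < N := by omega
    exact hc ⟨hrN, this⟩

-- stack shape invariant: strictly decreasing indices downward, nondecreasing heights upward,
-- gaps between consecutive entries filled with bars at least as tall as the upper entry
def StkGaps (hs : List Int) : List Int → Prop
  | [] => True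
  | t :: rest => below rest < t ∧ (rest = [] ∨ pvH hs (below rest) ≤ pvH hs t) ∧
      (∀ j, below rest < j → j < t → pvH hs j ≥ pvH hs t) ∧ StkGaps hs rest

def TopA (hs : List Int) (i : Int) : List Int → Prop
  | [] => True
  | t :: _ => t < i ∧ ∀ j, t < j → j < i → pvH hs j ≥ pvH hs t

def TopB (hs : List Int) (i : Int) : List Int → Prop
  | [] => ∀ j, 0 ≤ j → j < i → pvH hs j ≥ pvH hs i
  | t :: _ => ∀ j, t < j → j < i → pvH hs j ≥ pvH hs i

def InvBase (N : Int) (hs : List Int) (i : Int) (st : List Int) : Prop :=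
  0 ≤ i ∧ i ≤ N ∧ (∀ s ∈ st, 0 ≤ s ∧ s < N) ∧ StkGaps hs st ∧ TopA hs i st

def InvMain (N : Int) (hs : List Int) (i : Int) (st : List Int) : Prop :=
  InvBase N hs i st ∧ TopB hs i st

lemma invbase_pop (N : Int) (hs : List Int) (i t : Int) (rest : List Int)
    (inv : InvBase N hs i (t :: rest)) : InvBase N hs i rest := by
  obtain ⟨hi0, hiN, hrng, hg, ha⟩ := inv
  refine ⟨hi0, hiN, fun s hmem => hrng s (List.mem_cons_of_mem _ hmem), hg.2.2.2, ?_⟩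
  cases rest with
  | nil => trivial
  | cons p r =>
    obtain ⟨hpt, hple, hgap, _⟩ := hg
    rcases hple with h | hple; · exact absurd h (by simp)
    simp only [below] at hpt hple hgap
    have hti : t < i := ha.1
    refine ⟨by omega, fun j hj1 hj2 => ?_⟩
    rcases lt_trichotomy j t with h | h | h
    · exact le_trans hple (hgap j hj1 h)
    · subst h; exact hple
    · exact le_trans hple (ha.2 j h hj2)

lemma topB_pop (N : Int) (hs : List Int) (i t : Int) (rest : List Int)
    (inv : InvMain N hs i (t :: rest)) (hpop : pvH hs i < pvH hs t) : TopB hs i rest := by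
  obtain ⟨⟨hi0, hiN, hrng, hg, ha⟩, hb⟩ := inv
  obtain ⟨hpt, hple, hgap, _⟩ := hg
  cases rest with
  | nil =>
    simp only [below] at hpt hgap
    intro j hj1 hj2
    rcases lt_trichotomy j t with h | h | h
    · exact le_trans hpop.le (hgap j (by omega) h)
    · subst h; exact hpop.le
    · exact hb j h hj2
  | cons p r =>
    simp only [below] at hpt hgap
    intro j hj1 hj2
    rcases lt_trichotomy j t with h | h | h
    · exact le_trans hpop.le (hgap j hj1 h)
    · subst h; exact hpop.le
    · exact hb j h hj2

lemma invmain_pop (N : Int) (hs : List Int) (i t : Int) (rest : List Int)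
    (inv : InvMain N hs i (t :: rest)) (hpop : pvH hs i < pvH hs t) : InvMain N hs i rest :=
  ⟨invbase_pop N hs i t rest inv.1, topB_pop N hs i t rest inv hpop⟩

lemma invmain_push (N : Int) (hs : List Int) (i : Int) (st : List Int)
    (inv : InvMain N hs i st) (hiN : i < N)
    (hcond : match st with | [] => True | t :: _ => pvH hs t ≤ pvH hs i) :
    InvMain N hs (i + 1) (i :: st) := by
  obtain ⟨⟨hi0, _, hrng, hg, ha⟩, hb⟩ := inv
  refine ⟨⟨by omega, by omega, ?_, ?_, ?_⟩, ?_⟩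
  · intro s hmem
    rcases List.mem_cons.mp hmem with h | h
    · subst h; exact ⟨hi0, hiN⟩
    · exact hrng s h
  · -- StkGaps (i :: st)
    cases st with
    | nil =>
      refine ⟨by simp [below]; omega, Or.inl rfl, fun j hj1 hj2 => ?_, trivial⟩
      simp only [below] at hj1
      exact hb j (by omega) hj2
    | cons t r =>
      refine ⟨by simp only [below]; exact ha.1, Or.inr (by simpa [below] using hcond),
        fun j hj1 hj2 => ?_, hg⟩
      simp only [below] at hj1
      exact hb j hj1 hj2
  · exact ⟨by omega, fun j hj1 hj2 => by omega⟩
  · cases st <;> exact fun j hj1 hj2 => by omega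

lemma contrib_le_gval (N : Int) (hs : List Int) (t p i : Int)
    (ht0 : 0 ≤ t) (htN : t < N) (hpt : p < t) (hp : -1 ≤ p) (hti : t < i) (hiN : i ≤ N)
    (hgap : ∀ j, p < j → j < t → pvH hs j ≥ pvH hs t)
    (hright : ∀ j, t < j → j < i → pvH hs j ≥ pvH hs t) :
    (min (pvH hs t) (i - p - 1)) ^ 2 ≤ gval N hs t := by
  obtain ⟨l1, l2, l3, _⟩ := bLeft_spec hs (pvH hs t) (t - 1) (by omega)
  obtain ⟨r1, r2, r3, _⟩ := bRight_spec N hs (pvH hs t) (t + 1) (by omega)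
  set L := bLeft hs (pvH hs t) (t - 1) with hL
  set R := bRight N hs (pvH hs t) (t + 1) with hR
  have hLp : L ≤ p := by
    by_contra hgt
    have hL0 : 0 ≤ L := by omega
    exact absurd (hgap L (by omega) (by omega)) (by have := l3 hL0; omega)
  have hiR : i ≤ R := by
    by_contra hgt
    have hRN : R < N := by omega
    exact absurd (hright R (by omega) (by omega)) (by have := r3 hRN; omega)
  exact sq_min_mono _ _ _ (by omega) (by omega)

lemma contrib_ge_gval (N : Int) (hs : List Int) (m p i : Int)
    (hm0 : 0 ≤ m) (hmN : m < N) (hpm : p < m) (_hp : -1 ≤ p) (hmi : m < i) (_hiN : i ≤ N)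
    (hple : p = -1 ∨ pvH hs p ≤ pvH hs m)
    (hcan : CanL hs m) (hcond : i = N ∨ pvH hs i < pvH hs m) :
    gval N hs m ≤ (min (pvH hs m) (i - p - 1)) ^ 2 := by
  obtain ⟨l1, l2, l3, _⟩ := bLeft_spec hs (pvH hs m) (m - 1) (by omega)
  obtain ⟨r1, r2, r3, r4⟩ := bRight_spec N hs (pvH hs m) (m + 1) (by omega)
  set L := bLeft hs (pvH hs m) (m - 1) with hL
  set R := bRight N hs (pvH hs m) (m + 1) with hR
  have hpL : p ≤ L := by
    rcases hple with h | h
    · omega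
    · by_contra hgt
      exact absurd (hcan p (by omega) hpm) (by omega)
  have hRi : R ≤ i := by
    rcases hcond with h | h
    · omega
    · by_contra hgt
      exact absurd (r4 i (by omega) (by omega)) (by omega)
  exact sq_min_mono _ _ _ (by omega) (by omega)

-- equation lemma for A's drain loop, with the empty stack encoded as below = -1
lemma aDrain_cons (hs : List Int) (i t : Int) (rest : List Int) (ma : Int) :
    aDrain hs i (t :: rest) ma =
      aDrain hs i rest (max ma ((min (pvH hs t) (i - below rest - 1)) ^ 2)) := by
  cases rest <;> simp [aDrain, below]

-- B-side characterization
lemma bMain_ge_acc (N : Int) (hs : List Int) (ma i : Int) : ma ≤ bMain N hs ma i := by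
  fun_induction bMain N hs ma i with
  | case1 ma i hc hg l r ih => exact le_trans (le_max_left _ _) ih
  | case2 ma i hc => exact le_refl _

lemma bMain_ge_gval (N : Int) (hs : List Int) (j : Int) (h2 : j < N) :
    ∀ ma i, i ≤ j → gval N hs j ≤ bMain N hs ma i := by
  intro ma i
  fun_induction bMain N hs ma i with
  | case1 ma i hc hg l r ih =>
    intro h1
    by_cases h : i = j
    · subst h
      have he : gval N hs i = (min hg (r - l - 1)) ^ 2 := rfl
      rw [he]
      exact le_trans (le_max_right _ _) (bMain_ge_acc N hs _ _)
    · exact ih (by omega)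
  | case2 ma i hc =>
    intro h1
    exact absurd (by omega : i < N) hc

lemma bMain_le (N : Int) (hs : List Int) (X : Int)
    (hX : ∀ j, 0 ≤ j → j < N → gval N hs j ≤ X) :
    ∀ ma i, 0 ≤ i → ma ≤ X → bMain N hs ma i ≤ X := by
  intro ma i
  fun_induction bMain N hs ma i with
  | case1 ma i hc hg l r ih =>
    intro hi0 hma
    refine ih (by omega) (max_le hma ?_)
    have he : gval N hs i = (min hg (r - l - 1)) ^ 2 := rfl
    rw [← he]
    exact hX i hi0 hc
  | case2 ma i hc =>
    intro _ hma
    exact hma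

-- A-side, ≤ direction: every contribution is bounded by some gval
lemma aDrain_le (N : Int) (hs : List Int) (X : Int)
    (hX : ∀ j, 0 ≤ j → j < N → gval N hs j ≤ X) (i : Int) :
    ∀ st ma, InvBase N hs i st → ma ≤ X → aDrain hs i st ma ≤ X := by
  intro st
  induction st with
  | nil =>
    intro ma _ hma
    simpa [aDrain] using hma
  | cons t rest ih =>
    intro ma inv hma
    obtain ⟨hi0, hiN, hrng, hgaps, hta⟩ := inv
    have hp1 : (-1 : Int) ≤ below rest := by
      cases rest with
      | nil => simp [below]
      | cons p r => have := (hrng p (by simp)).1; simp only [below]; omega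
    have ht := hrng t List.mem_cons_self
    have hcontrib : (min (pvH hs t) (i - below rest - 1)) ^ 2 ≤ X := by
      refine le_trans (contrib_le_gval N hs t (below rest) i ht.1 ht.2 hgaps.1 hp1 hta.1 hiN
        hgaps.2.2.1 hta.2) (hX t ht.1 ht.2)
    rw [aDrain_cons]
    exact ih _ (invbase_pop N hs i t rest ⟨hi0, hiN, hrng, hgaps, hta⟩) (max_le hma hcontrib)

lemma aDrain_mono (hs : List Int) (i : Int) :
    ∀ st ma, ma ≤ aDrain hs i st ma := by
  intro st
  induction st with
  | nil => intro ma; simp [aDrain]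
  | cons t rest ih =>
    intro ma
    rw [aDrain_cons]
    exact le_trans (le_max_left _ _) (ih _)

lemma aMain_mono (N : Int) (hs : List Int) (st : List Int) (ma i : Int) :
    ma ≤ aMain N hs st ma i := by
  fun_induction aMain N hs st ma i with
  | case1 ma i hc ih => exact ih
  | case2 ma i hc t rest hge ih => exact ih
  | case3 ma i hc t rest hge width ih => exact le_trans (le_max_left _ _) ih
  | case4 st ma i hc => exact aDrain_mono hs i st ma

lemma aMain_le (N : Int) (hs : List Int) (X : Int)
    (hX : ∀ j, 0 ≤ j → j < N → gval N hs j ≤ X) :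
    ∀ st ma i, InvMain N hs i st → ma ≤ X → aMain N hs st ma i ≤ X := by
  intro st ma i
  fun_induction aMain N hs st ma i with
  | case1 ma i hc ih =>
    intro inv hma
    exact ih (invmain_push N hs i [] inv hc trivial) hma
  | case2 ma i hc t rest hge ih =>
    intro inv hma
    exact ih (invmain_push N hs i (t :: rest) inv hc hge) hma
  | case3 ma i hc t rest hge width ih =>
    intro inv hma
    have hpop : pvH hs i < pvH hs t := by omega
    have hw : width = i - below rest - 1 := by
      simp only [width]; cases rest <;> simp [below]
    obtain ⟨⟨hi0, hiN, hrng, hgaps, hta⟩, htb⟩ := inv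
    have hp1 : (-1 : Int) ≤ below rest := by
      cases rest with
      | nil => simp [below]
      | cons p r => have := (hrng p (by simp)).1; simp only [below]; omega
    have ht := hrng t List.mem_cons_self
    have hcontrib : (min (pvH hs t) width) ^ 2 ≤ X := by
      rw [hw]
      exact le_trans (contrib_le_gval N hs t (below rest) i ht.1 ht.2 hgaps.1 hp1 hta.1
        (by omega) hgaps.2.2.1 hta.2) (hX t ht.1 ht.2)
    exact ih (invmain_pop N hs i t rest ⟨⟨hi0, hiN, hrng, hgaps, hta⟩, htb⟩ hpop)
      (max_le hma hcontrib)
  | case4 st ma i hc =>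
    intro inv hma
    exact aDrain_le N hs X hX i st ma inv.1 hma

-- A-side, ≥ direction: every canonical bar's gval is attained
lemma aDrain_ge (N : Int) (hs : List Int) (m : Int) (hm0 : 0 ≤ m) (hmN : m < N)
    (hcan : CanL hs m) (i : Int) (hiN : i = N) :
    ∀ st ma, InvBase N hs i st → (m ∈ st ∨ gval N hs m ≤ ma) → gval N hs m ≤ aDrain hs i st ma := by
  intro st
  induction st with
  | nil =>
    intro ma _ hst
    rcases hst with h | h
    · simp at h
    · simpa [aDrain] using h
  | cons t rest ih =>
    intro ma inv hst
    obtain ⟨hi0, hiN', hrng, hgaps, hta⟩ := inv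
    have hp1 : (-1 : Int) ≤ below rest := by
      cases rest with
      | nil => simp [below]
      | cons p r => have := (hrng p (by simp)).1; simp only [below]; omega
    rw [aDrain_cons]
    refine ih _ (invbase_pop N hs i t rest ⟨hi0, hiN', hrng, hgaps, hta⟩) ?_
    by_cases htm : t = m
    · subst htm
      have hcg : gval N hs t ≤ (min (pvH hs t) (i - below rest - 1)) ^ 2 := by
        refine contrib_ge_gval N hs t (below rest) i hm0 hmN hgaps.1 hp1 hta.1 (by omega) ?_
          hcan (Or.inl hiN)
        cases rest with
        | nil => exact Or.inl rfl
        | cons p r => exact Or.inr (by simpa [below] using hgaps.2.1.resolve_left (by simp))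
      exact Or.inr (le_trans hcg (le_max_right _ _))
    · rcases hst with h | h
      · rcases List.mem_cons.mp h with h' | h'
        · exact absurd h'.symm htm
        · exact Or.inl h'
      · exact Or.inr (le_trans h (le_max_left _ _))

lemma aMain_ge (N : Int) (hs : List Int) (m : Int) (hm0 : 0 ≤ m) (hmN : m < N)
    (hcan : CanL hs m) :
    ∀ st ma i, InvMain N hs i st → (m < i → (m ∈ st ∨ gval N hs m ≤ ma)) →
      gval N hs m ≤ aMain N hs st ma i := by
  intro st ma i
  fun_induction aMain N hs st ma i with
  | case1 ma i hc ih =>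
    intro inv hst
    refine ih (invmain_push N hs i [] inv hc trivial) (fun hmi => ?_)
    rcases lt_or_ge m i with h | h
    · rcases hst h with h' | h'
      · simp at h'
      · exact Or.inr h'
    · have : m = i := by omega
      exact Or.inl (by simp [this])
  | case2 ma i hc t rest hge ih =>
    intro inv hst
    refine ih (invmain_push N hs i (t :: rest) inv hc hge) (fun hmi => ?_)
    rcases lt_or_ge m i with h | h
    · rcases hst h with h' | h'
      · exact Or.inl (List.mem_cons_of_mem _ h')
      · exact Or.inr h'
    · have : m = i := by omega
      exact Or.inl (by simp [this])
  | case3 ma i hc t rest hge width ih =>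
    intro inv hst
    have hpop : pvH hs i < pvH hs t := by omega
    have hw : width = i - below rest - 1 := by
      simp only [width]; cases rest <;> simp [below]
    obtain ⟨⟨hi0, hiN, hrng, hgaps, hta⟩, htb⟩ := inv
    have hp1 : (-1 : Int) ≤ below rest := by
      cases rest with
      | nil => simp [below]
      | cons p r => have := (hrng p (by simp)).1; simp only [below]; omega
    refine ih (invmain_pop N hs i t rest ⟨⟨hi0, hiN, hrng, hgaps, hta⟩, htb⟩ hpop)
      (fun hmi => ?_)
    by_cases htm : t = m
    · subst htm
      have hcg : gval N hs t ≤ (min (pvH hs t) width) ^ 2 := by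
        rw [hw]
        refine contrib_ge_gval N hs t (below rest) i hm0 hmN hgaps.1 hp1 hta.1 (by omega) ?_
          hcan (Or.inr hpop)
        cases rest with
        | nil => exact Or.inl rfl
        | cons p r => exact Or.inr (by simpa [below] using hgaps.2.1.resolve_left (by simp))
      exact Or.inr (le_trans hcg (le_max_right _ _))
    · rcases hst hmi with h | h
      · rcases List.mem_cons.mp h with h' | h'
        · exact absurd h'.symm htm
        · exact Or.inl h'
      · exact Or.inr (le_trans h (le_max_left _ _))
  | case4 st ma i hc =>
    intro inv hst
    have hiN : i = N := by have := inv.1.2.1; omega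
    exact aDrain_ge N hs m hm0 hmN hcan i hiN st ma inv.1 (hst (by omega))

-- every bar has a canonical representative with the same gval
lemma exists_canonical (N : Int) (hs : List Int) (m : Int) (hm0 : 0 ≤ m) (hmN : m < N) :
    ∃ c, 0 ≤ c ∧ c < N ∧ CanL hs c ∧ gval N hs c = gval N hs m := by
  have key : ∀ k : Nat, ∀ m : Int, m.toNat = k → 0 ≤ m → m < N →
      ∃ c, 0 ≤ c ∧ c < N ∧ CanL hs c ∧ gval N hs c = gval N hs m := by
    intro k
    induction k using Nat.strong_induction_on with
    | _ k IH =>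
      intro m hk hm0 hmN
      by_cases hc : CanL hs m
      · exact ⟨m, hm0, hmN, hc, rfl⟩
      · obtain ⟨l1, l2, l3, l4⟩ := bLeft_spec hs (pvH hs m) (m - 1) (by omega)
        obtain ⟨r1, r2, r3, r4⟩ := bRight_spec N hs (pvH hs m) (m + 1) (by omega)
        set L := bLeft hs (pvH hs m) (m - 1) with hLdef
        set R := bRight N hs (pvH hs m) (m + 1) with hRdef
        unfold CanL at hc
        simp only [not_forall, not_lt] at hc
        obtain ⟨j, hj1, hj2, hj3⟩ := hc
        rw [← hLdef] at hj1
        have hjge : pvH hs j ≥ pvH hs m := l4 j hj1 (by omega)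
        have hjeq : pvH hs j = pvH hs m := le_antisymm hj3 hjge
        have hj0 : 0 ≤ j := by omega
        have hLj : bLeft hs (pvH hs j) (j - 1) = L := by
          rw [hjeq]
          exact bLeft_eq_of hs (pvH hs m) (j - 1) L l1 (by omega) l3
            (fun k hk1 hk2 => l4 k hk1 (by omega))
        have hRj : bRight N hs (pvH hs j) (j + 1) = R := by
          rw [hjeq]
          refine bRight_eq_of N hs (pvH hs m) (j + 1) R (by omega) r2 r3 ?_
          intro k hk1 hk2
          rcases lt_trichotomy k m with h | h | h
          · exact l4 k (by omega) (by omega)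
          · subst h; exact le_refl _
          · exact r4 k (by omega) hk2
        have hgv : gval N hs j = gval N hs m := by
          unfold gval
          rw [hLj, hRj, hjeq]
        obtain ⟨c, hc1, hc2, hc3, hc4⟩ := IH j.toNat (by omega) j rfl hj0 (by omega)
        exact ⟨c, hc1, hc2, hc3, hc4.trans hgv⟩
  exact key m.toNat m rfl hm0 hmN

lemma invmain_init (N : Int) (hs : List Int) (hN : 0 ≤ N) : InvMain N hs 0 [] := by
  refine ⟨⟨le_refl _, hN, by simp, trivial, trivial⟩, fun j hj1 hj2 => by omega⟩

lemma main_eq (N : Int) (hs : List Int) : aMain N hs [] 0 0 = bMain N hs 0 0 := by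
  rcases le_or_gt N 0 with hN | hN
  · have ha : aMain N hs [] 0 0 = 0 := by
      rw [aMain.eq_def, dif_neg (by omega : ¬ (0:Int) < N)]
      simp [aDrain]
    have hb : bMain N hs 0 0 = 0 := by
      rw [bMain.eq_def, dif_neg (by omega : ¬ (0:Int) < N)]
    rw [ha, hb]
  · refine le_antisymm ?_ ?_
    · refine aMain_le N hs (bMain N hs 0 0) ?_ [] 0 0 (invmain_init N hs (by omega))
        (bMain_ge_acc N hs 0 0)
      intro j hj1 hj2
      exact bMain_ge_gval N hs j hj2 0 0 (by omega)
    · refine bMain_le N hs (aMain N hs [] 0 0) ?_ 0 0 (le_refl _) (aMain_mono N hs [] 0 0)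
      intro j hj1 hj2
      obtain ⟨c, hc1, hc2, hc3, hc4⟩ := exists_canonical N hs j hj1 hj2
      rw [← hc4]
      exact aMain_ge N hs c hc1 hc2 hc3 [] 0 0 (invmain_init N hs (by omega)) (by omega)

-- ===== VERDICT (by name: the statement is the Claim_ definition above) =====
theorem largest_square_in_histogram_spec : Claim_equal_largest_square_in_histogram := by
  intro N heights _dom _pre
  unfold Spec_largest_square_in_histogram largest_square_in_histogram largest_square_in_histogram_alt
  exact main_eq N heights
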